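-- pv_equiv track=rewrite | github.com/ryor310575/Python_Programming_MOOC_2025 | part05-27_letter_square/src/letter_square.py | max_pad
-- ===== SOURCE A (Python) =====
-- def initial_pad(character:str,word:str,times:int)->str:
--     new_word=word
--     i=0
--     while i<times:
--         new_word=character+new_word
--         i+=1
--     return new_word
--
-- def final_pad(character:str,word:str,times:int)->str:
--     new_word=word
--     i=0
--     while i<times:
--         new_word=new_word+character
--         i+=1
--     return new_word
--
-- def bilateral_pad(character:str,word:str,times:int)->str:
--     new_word=initial_pad(character,final_pad(character,word,times),times)
--     return new_word
--
-- def max_pad(word:str,size:int,alphabet:tuple,char_pos:int)->str: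
--     character=""
--     new_word=word
--     word_lenght=len(new_word)
--     while word_lenght < size:
--         character=alphabet[char_pos]
--         new_word=bilateral_pad(character,new_word,1)
--         word_lenght=len(new_word)
--         char_pos+=1
--     return new_word
-- ===== SOURCE B (Python) =====
-- def max_pad(word, size, alphabet, char_pos):
--     # Pass 1: pure arithmetic - determine how many alphabet entries are consumed.
--     need = size - len(word)
--     k = 0
--     while need > 0:
--         need -= 2 * len(alphabet[char_pos + k])
--         k += 1
--     # Pass 2: fetch exactly those entries and assemble the result once.
--     pads = [alphabet[char_pos + i] for i in range(k)]
--     return ''.join(reversed(pads)) + word + ''.join(pads)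
-- ===== Notes on version B (the rewrite author's own statement) =====
-- stated objective: alternative
-- what changed: A grows the string itself inside its loop, rewrapping it through three pad helper functions at every iteration; B never touches the string while looping: a first purely arithmetic pass counts how many alphabet entries are needed from their lengths, then a comprehension over range(k) fetches exactly those entries and the result is assembled in one concatenation of the reversed join, the word and the forward join.
import Mathlib
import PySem

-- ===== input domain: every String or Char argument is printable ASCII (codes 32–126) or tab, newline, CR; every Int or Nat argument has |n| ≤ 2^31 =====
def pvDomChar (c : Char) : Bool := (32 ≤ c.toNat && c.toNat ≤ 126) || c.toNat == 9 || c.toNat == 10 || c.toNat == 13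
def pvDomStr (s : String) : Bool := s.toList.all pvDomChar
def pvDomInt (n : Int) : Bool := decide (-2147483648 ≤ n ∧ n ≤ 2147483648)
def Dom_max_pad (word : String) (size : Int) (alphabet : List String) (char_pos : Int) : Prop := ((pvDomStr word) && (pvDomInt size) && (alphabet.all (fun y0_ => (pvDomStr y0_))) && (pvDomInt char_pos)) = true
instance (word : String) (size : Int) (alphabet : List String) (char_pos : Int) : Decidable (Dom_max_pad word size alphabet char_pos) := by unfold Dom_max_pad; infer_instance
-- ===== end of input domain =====

-- B replaces A's grow-by-rewrapping loop (three pad helpers rebuilding the string each step)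
-- by an arithmetic sizing pass that only counts consumed entries, then a comprehension over
-- range(k) and one final assembly: alternative decomposition (staged passes, no string growth).
-- Pre_ excludes exactly the inputs where A raises IndexError (alphabet exhausted while still short).


-- ===== PORT A =====
-- while i < times: new_word = character + new_word; i += 1
def initialPadLoop (character : List Char) (new_word : List Char) (i times : Int) : List Char :=
  if i < times then initialPadLoop character (character ++ new_word) (i + 1) times else new_word
termination_by (times - i).toNat
decreasing_by omega

def initial_pad (character : List Char) (word : List Char) (times : Int) : List Char :=
  initialPadLoop character word 0 times

-- while i < times: new_word = new_word + character; i += 1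
def finalPadLoop (character : List Char) (new_word : List Char) (i times : Int) : List Char :=
  if i < times then finalPadLoop character (new_word ++ character) (i + 1) times else new_word
termination_by (times - i).toNat
decreasing_by omega

def final_pad (character : List Char) (word : List Char) (times : Int) : List Char :=
  finalPadLoop character word 0 times

def bilateral_pad (character : List Char) (word : List Char) (times : Int) : List Char :=
  initial_pad character (final_pad character word times) times

-- A's indexing succeeds only when the index is below the length (needed for termination)
theorem pyGet?_some_lt {α : Type} {xs : List α} {i : Int} {x : α}
    (h : PySem.List.pyGet? xs i = some x) : i < (xs.length : Int) := by
  by_contra hn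
  rw [(PySem.List.pyGet?_eq_none_iff xs i).2 (by unfold PySem.Raise.InRange; omega)] at h
  exact absurd h (by simp)

-- while word_lenght < size: character = alphabet[char_pos]; new_word = bilateral_pad(character,new_word,1); char_pos += 1
-- (the none branch is Python's IndexError; excluded by Pre_max_pad)
def maxPadLoop (size : Int) (alphabet : List String) (new_word : List Char) (char_pos : Int) : List Char :=
  if (new_word.length : Int) < size then
    match h : PySem.List.pyGet? alphabet char_pos with
    | none => []
    | some character => maxPadLoop size alphabet (bilateral_pad character.toList new_word 1) (char_pos + 1)
  else new_word
termination_by ((alphabet.length : Int) - char_pos).toNat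
decreasing_by have := pyGet?_some_lt h; omega

def max_pad (word : String) (size : Int) (alphabet : List String) (char_pos : Int) : String :=
  String.ofList (maxPadLoop size alphabet word.toList char_pos)

-- ===== PORT B =====
-- pass 1: while need > 0: need -= 2*len(alphabet[char_pos+k]); k += 1
-- (the none branch is Python's IndexError; excluded by Pre_max_pad)
def countKLoop (alphabet : List String) (need char_pos k : Int) : Int :=
  if 0 < need then
    match h : PySem.List.pyGet? alphabet (char_pos + k) with
    | none => k
    | some c => countKLoop alphabet (need - 2 * (c.toList.length : Int)) char_pos (k + 1)
  else k
termination_by ((alphabet.length : Int) - (char_pos + k)).toNat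
decreasing_by have := pyGet?_some_lt h; omega

-- pads = [alphabet[char_pos+i] for i in range(k)]; return ''.join(reversed(pads)) + word + ''.join(pads)
-- (indices in range(k) were all checked in pass 1, so pyGetD's default is unreachable inside Pre_)
def max_pad_alt (word : String) (size : Int) (alphabet : List String) (char_pos : Int) : String :=
  let k := countKLoop alphabet (size - (word.toList.length : Int)) char_pos 0
  let pads := (PySem.List.pyRange 0 k 1).map (fun i => PySem.List.pyGetD alphabet (char_pos + i) "")
  String.ofList (PySem.Chars.join [] (pads.reverse.map String.toList) ++ word.toList
             ++ PySem.Chars.join [] (pads.map String.toList))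

-- ===== PRECONDITION & SPEC =====
-- sum of the lengths of the k alphabet entries starting at index cp
def padSum (alphabet : List String) (cp : Int) : Nat → Int
  | 0 => 0
  | k + 1 => ((PySem.List.pyGetD alphabet cp "").toList.length : Int) + padSum alphabet (cp + 1) k

-- Pre_ excludes exactly the inputs on which A raises IndexError: some k consecutive alphabet
-- entries starting at char_pos must be in range and long enough to reach size.
def Pre_max_pad (word : String) (size : Int) (alphabet : List String) (char_pos : Int) : Prop :=
  size ≤ (word.toList.length : Int) ∨
  ∃ k ≤ 2 * alphabet.length, 1 ≤ k ∧
    (∀ i : Nat, i < k → PySem.Raise.InRange alphabet.length (char_pos + (i : Int))) ∧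
    size ≤ (word.toList.length : Int) + 2 * padSum alphabet char_pos k
instance (word : String) (size : Int) (alphabet : List String) (char_pos : Int) : Decidable (Pre_max_pad word size alphabet char_pos) := by unfold Pre_max_pad; infer_instance

def pvWitness_max_pad : String × Int × List String × Int := ("hi", 6, ["a", "b", "c"], 0)

def Spec_max_pad (word : String) (size : Int) (alphabet : List String) (char_pos : Int) (out : String) : Prop := out = max_pad_alt word size alphabet char_pos
instance (word : String) (size : Int) (alphabet : List String) (char_pos : Int) (out : String) : Decidable (Spec_max_pad word size alphabet char_pos out) := by unfold Spec_max_pad; infer_instance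

-- ===== CLAIM (what is proved, stated in full; the proofs are below) =====
def Claim_equal_max_pad : Prop := ∀ (word : String) (size : Int) (alphabet : List String) (char_pos : Int), Dom_max_pad word size alphabet char_pos → Pre_max_pad word size alphabet char_pos → Spec_max_pad word size alphabet char_pos (max_pad word size alphabet char_pos)

-- ===== LEMMAS AND PROOFS =====

-- proof-only helper: the list of alphabet entries the computation consumes
def consume (alphabet : List String) (j : Int) (need : Int) : List String :=
  if 0 < need then
    match h : PySem.List.pyGet? alphabet j with
    | none => []
    | some c => c :: consume alphabet (j + 1) (need - 2 * (c.toList.length : Int))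
  else []
termination_by ((alphabet.length : Int) - j).toNat
decreasing_by have := pyGet?_some_lt h; omega

-- the loop starting at cp with `need` characters still missing terminates without IndexError
def goodFrom (alphabet : List String) (cp : Int) (need : Int) : Prop :=
  need ≤ 0 ∨
  ∃ k ≤ 2 * alphabet.length, 1 ≤ k ∧
    (∀ i : Nat, i < k → PySem.Raise.InRange alphabet.length (cp + (i : Int))) ∧
    need ≤ 2 * padSum alphabet cp k

theorem join_nil_cons (x : List Char) (xss : List (List Char)) :
    PySem.Chars.join [] (x :: xss) = x ++ PySem.Chars.join [] xss := by
  cases xss with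
  | nil => rw [PySem.Chars.join_singleton, PySem.Chars.join_nil, List.append_nil]
  | cons y ys => rw [PySem.Chars.join_cons_cons]; simp

theorem join_nil_append_singleton (xss : List (List Char)) (x : List Char) :
    PySem.Chars.join [] (xss ++ [x]) = PySem.Chars.join [] xss ++ x := by
  induction xss with
  | nil => simp [PySem.Chars.join_nil]
  | cons y ys ih => rw [List.cons_append, join_nil_cons, join_nil_cons, ih, List.append_assoc]

theorem bilateral_pad_one (c w : List Char) :
    bilateral_pad c w 1 = c ++ w ++ c := by
  unfold bilateral_pad initial_pad final_pad
  rw [finalPadLoop, if_pos (by norm_num), finalPadLoop, if_neg (by norm_num),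
      initialPadLoop, if_pos (by norm_num), initialPadLoop, if_neg (by norm_num)]
  simp [List.append_assoc]

theorem pyGetD_of_some {alphabet : List String} {i : Int} {c : String}
    (h : PySem.List.pyGet? alphabet i = some c) :
    PySem.List.pyGetD alphabet i "" = c := by
  simp [PySem.List.pyGetD, h]

theorem consume_pos {alphabet : List String} {j need : Int} {c : String}
    (hneed : 0 < need) (h : PySem.List.pyGet? alphabet j = some c) :
    consume alphabet j need = c :: consume alphabet (j + 1) (need - 2 * (c.toList.length : Int)) := by
  rw [consume, if_pos hneed]
  split
  · next h' => rw [h] at h'; exact absurd h' (by simp)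
  · next c' h' => rw [h] at h'; injection h' with h''; rw [h'']

theorem consume_none {alphabet : List String} {j need : Int}
    (hneed : 0 < need) (h : PySem.List.pyGet? alphabet j = none) :
    consume alphabet j need = [] := by
  rw [consume, if_pos hneed]
  split
  · rfl
  · next c h' => rw [h] at h'; exact absurd h' (by simp)

theorem consume_nonpos {alphabet : List String} {j need : Int} (hneed : ¬ 0 < need) :
    consume alphabet j need = [] := by
  rw [consume, if_neg hneed]

-- B's pass 1 counts exactly the entries `consume` lists
theorem countK_eq (alphabet : List String) :
    ∀ (need cp k : Int),
      countKLoop alphabet need cp k = k + ((consume alphabet (cp + k) need).length : Int) := by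
  intro need cp k
  fun_induction countKLoop alphabet need cp k with
  | case1 need k hpos h =>
      rw [consume_none hpos h]; simp
  | case2 need k hpos c h ih =>
      rw [ih, consume_pos hpos h]
      have : cp + (k + 1) = cp + k + 1 := by ring
      rw [this]
      simp; ring
  | case3 need k hpos =>
      rw [consume_nonpos hpos]; simp

-- B's pass 2 rebuilds exactly the consumed entries
theorem map_range_consume (alphabet : List String) :
    ∀ (need cp : Int),
      (PySem.List.pyRange 0 ((consume alphabet cp need).length : Int) 1).map
        (fun i => PySem.List.pyGetD alphabet (cp + i) "") = consume alphabet cp need := by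
  intro need cp
  fun_induction consume alphabet cp need with
  | case1 cp need hpos h => simp
  | case2 cp need hpos c h ih =>
      simp only [List.length_cons]
      have hcons : PySem.List.pyRange 0 (((consume alphabet (cp + 1) (need - 2 * (c.toList.length : Int))).length : Int) + 1) 1
          = 0 :: PySem.List.pyRange 1 (((consume alphabet (cp + 1) (need - 2 * (c.toList.length : Int))).length : Int) + 1) 1 := by
        exact PySem.List.pyRange_one_cons (by omega)
      rw [show ((((consume alphabet (cp + 1) (need - 2 * (c.toList.length : Int))).length + 1 : Nat)) : Int)
            = ((consume alphabet (cp + 1) (need - 2 * (c.toList.length : Int))).length : Int) + 1 by push_cast; ring]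
      rw [hcons, List.map_cons, add_zero, pyGetD_of_some h]
      congr 1
      rw [PySem.List.pyRange_one] at ih ⊢
      simp only [List.map_map] at ih ⊢
      rw [show (((consume alphabet (cp + 1) (need - 2 * (c.toList.length : Int))).length : Int) + 1 - 1).toNat
            = (((consume alphabet (cp + 1) (need - 2 * (c.toList.length : Int))).length : Int) - 0).toNat by omega]
      refine Eq.trans ?_ ih
      apply List.map_congr_left
      intro a _
      simp only [Function.comp_apply]
      congr 1
      ring
  | case3 cp need hpos => simp

-- A's loop produces exactly the consumed block wrapped symmetrically around the word
theorem maxPadLoop_eq (size : Int) (alphabet : List String) :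
    ∀ (w : List Char) (cp : Int),
      goodFrom alphabet cp (size - (w.length : Int)) →
      maxPadLoop size alphabet w cp =
        PySem.Chars.join [] ((consume alphabet cp (size - (w.length : Int))).reverse.map String.toList)
          ++ w ++
        PySem.Chars.join [] ((consume alphabet cp (size - (w.length : Int))).map String.toList) := by
  intro w cp
  fun_induction maxPadLoop size alphabet w cp with
  | case1 w cp hlt h =>
      intro hg
      rcases hg with hg | ⟨k, hk2n, hk1, hrange, hsum⟩
      · omega
      · have h0 := hrange 0 (by omega)
        simp only [Nat.cast_zero, add_zero] at h0
        exact absurd h0 ((PySem.List.pyGet?_eq_none_iff alphabet cp).1 h)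
  | case2 w cp hlt c h ih =>
      intro hg
      have hgetD := pyGetD_of_some h
      have hlen : ((bilateral_pad c.toList w 1).length : Int)
          = (w.length : Int) + 2 * (c.toList.length : Int) := by
        rw [bilateral_pad_one]; simp; ring
      have hg' : goodFrom alphabet (cp + 1)
          (size - ((bilateral_pad c.toList w 1).length : Int)) := by
        rcases hg with hg | ⟨k, hk2n, hk1, hrange, hsum⟩
        · omega
        · rcases Nat.exists_eq_add_of_le hk1 with ⟨k', rfl⟩
          rw [Nat.add_comm 1 k', padSum, hgetD] at hsum
          by_cases hk0 : k' = 0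
          · subst hk0
            left
            rw [show padSum alphabet (cp + 1) 0 = 0 from rfl] at hsum
            omega
          · right
            refine ⟨k', by omega, by omega, ?_, by omega⟩
            intro i hi
            have hr := hrange (i + 1) (by omega)
            rw [show cp + ((i + 1 : Nat) : Int) = cp + 1 + (i : Int) by push_cast; ring] at hr
            exact hr
      have := ih hg'
      rw [this, consume_pos (by omega) h, hlen]
      have harg : size - ((w.length : Int) + 2 * (c.toList.length : Int))
          = size - (w.length : Int) - 2 * (c.toList.length : Int) := by ring
      rw [harg]
      simp only [List.reverse_cons, List.map_append,
        join_nil_append_singleton, List.map, join_nil_cons, bilateral_pad_one]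
      simp [List.append_assoc]
  | case3 w cp hge =>
      intro _
      rw [consume_nonpos (by omega)]
      simp [PySem.Chars.join_nil]

-- ===== VERDICT =====
theorem max_pad_spec : Claim_equal_max_pad := by
  intro word size alphabet char_pos _ hpre
  have hg : goodFrom alphabet char_pos (size - (word.toList.length : Int)) := by
    rcases hpre with h | ⟨k, hk2n, hk1, hr, hs⟩
    · left; omega
    · right; exact ⟨k, hk2n, hk1, hr, by omega⟩
  unfold Spec_max_pad max_pad max_pad_alt
  simp only [countK_eq, zero_add, add_zero, map_range_consume,
      maxPadLoop_eq size alphabet word.toList char_pos hg]
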